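-- pv_equiv track=rewrite | github.com/zuoqing1988/ZQCNN | TensorFlow_to_ZQCNN/convertor.py | HWCN_to_NCHW
-- ===== SOURCE A (Python) =====
-- def HWCN_to_NCHW(in_data, N, C, H, W):
--     out_data = list()
--     num_float = N*C*H*W
--     WCN = W*C*N
--     CN = C*N
--
--     for n in range(N):
--         for c in range(C):
--             for h in range(H):
--                 for w in range(W):
--                     out_data.append(in_data[h*WCN+w*CN+c*N+n])
--     return out_data
-- ===== SOURCE B (Python) =====
-- def HWCN_to_NCHW(in_data, N, C, H, W):
--     if N <= 0 or C <= 0 or H <= 0 or W <= 0: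
--         return []
--     # Stage 1: view in_data as an (H*W*C) x N matrix (rows indexed by (h,w,c),
--     # entries over n) and transpose it with zip(*rows): one column per n,
--     # each column laid out as (HW, C).
--     rows = [in_data[i * N:(i + 1) * N] for i in range(H * W * C)]
--     out = []
--     for col in zip(*rows):
--         # Stage 2: transpose each column as an (H*W) x C matrix, giving C
--         # runs of length H*W; concatenated they are that n's CHW block.
--         rows2 = [col[j * C:(j + 1) * C] for j in range(H * W)]
--         for col2 in zip(*rows2):
--             out.extend(col2)
--     return out
-- ===== Notes on version B (the rewrite author's own statement) =====
-- stated objective: alternative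
-- what changed: Replaces A's four nested loops with per-element index arithmetic by two staged 2D matrix transposes: chunk in_data into (H*W*C) rows of length N, transpose with zip(*rows) to get one column per n, then transpose each column as an (H*W) x C matrix and concatenate; no per-element index computation at all.
import Mathlib
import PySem

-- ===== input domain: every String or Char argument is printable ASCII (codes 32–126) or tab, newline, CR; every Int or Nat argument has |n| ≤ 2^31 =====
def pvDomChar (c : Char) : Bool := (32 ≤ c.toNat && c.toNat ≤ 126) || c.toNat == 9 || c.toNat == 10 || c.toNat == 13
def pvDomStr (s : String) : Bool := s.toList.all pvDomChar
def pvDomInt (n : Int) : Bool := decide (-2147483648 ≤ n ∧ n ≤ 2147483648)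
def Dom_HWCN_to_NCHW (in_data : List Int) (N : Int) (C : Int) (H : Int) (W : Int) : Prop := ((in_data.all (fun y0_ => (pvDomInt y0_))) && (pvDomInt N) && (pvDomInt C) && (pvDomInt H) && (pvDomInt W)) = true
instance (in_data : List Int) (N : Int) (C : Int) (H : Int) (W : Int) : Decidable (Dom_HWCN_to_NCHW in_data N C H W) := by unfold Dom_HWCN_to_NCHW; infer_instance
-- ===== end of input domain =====

-- B replaces A's per-element index-arithmetic gather by two staged 2D matrix transposes
-- (chunk into rows, zip(*rows)); objective: alternative (same cost, no index arithmetic).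

-- ===== PORT A =====
-- literal transliteration of A: four nested `for` loops appending in_data[h*WCN+w*CN+c*N+n].
-- in_data[i] is ported as pyGetD (default never read): Pre_ guarantees the index is in range.
def HWCN_to_NCHW (in_data : List Int) (N : Int) (C : Int) (H : Int) (W : Int) : List Int :=
  let WCN := W*C*N
  let CN := C*N
  (PySem.List.pyRange 0 N 1).foldl (fun acc n =>
    (PySem.List.pyRange 0 C 1).foldl (fun acc c =>
      (PySem.List.pyRange 0 H 1).foldl (fun acc h =>
        (PySem.List.pyRange 0 W 1).foldl (fun acc w =>
          acc ++ [PySem.List.pyGetD in_data (h*WCN + w*CN + c*N + n) 0]) acc) acc) acc) []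

-- ===== PORT B =====
-- hand port of Python's zip(*rows) (PySem has no variadic zip): while no row is exhausted,
-- emit the list of heads and step every row to its tail; exact on every input.
def pyZipStar {α : Type} (rows : List (List α)) : List (List α) :=
  if rows.isEmpty || rows.any List.isEmpty then []
  else (rows.filterMap List.head?) :: pyZipStar (rows.map List.tail)
termination_by (rows.map List.length).sum
decreasing_by
  simp only [List.isEmpty_iff, Bool.or_eq_true, List.any_eq_true, not_or, not_exists] at *
  rename_i h
  obtain ⟨hne, hall⟩ := h
  simp only [List.map_map]
  cases rows with
  | nil => exact absurd rfl hne
  | cons r rs =>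
    have hr : r ≠ [] := by
      intro hr
      exact (hall r) ⟨by simp, hr⟩
    simp only [List.map_cons, List.sum_cons, Function.comp]
    have h1 : r.tail.length < r.length := by
      cases r with | nil => exact absurd rfl hr | cons x xs => simp
    have hle : ((rs.map fun x => x.tail.length).sum) ≤ (rs.map List.length).sum := by
      apply List.Forall₂.sum_le_sum
      rw [List.forall₂_map_left_iff, List.forall₂_map_right_iff]
      exact List.forall₂_same.mpr (fun x _ => by cases x <;> simp)
    simp only [Function.comp_def] at *
    omega

-- literal transliteration of Source B: guard, rows = slices of length N, outer loop over
-- zip(*rows) columns, inner slices of length C, inner loop over zip(*rows2), extend.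
def HWCN_to_NCHW_alt (in_data : List Int) (N : Int) (C : Int) (H : Int) (W : Int) : List Int :=
  if N ≤ 0 ∨ C ≤ 0 ∨ H ≤ 0 ∨ W ≤ 0 then []
  else
    let rows := (PySem.List.pyRange 0 (H*W*C) 1).map
      (fun i => PySem.List.slice in_data (some (i*N)) (some ((i+1)*N)))
    (pyZipStar rows).foldl (fun out col =>
      let rows2 := (PySem.List.pyRange 0 (H*W) 1).map
        (fun j => PySem.List.slice col (some (j*C)) (some ((j+1)*C)))
      (pyZipStar rows2).foldl (fun out col2 => out ++ col2) out) []

-- ===== PRECONDITION & SPEC =====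
-- Pre_ excludes exactly the inputs where A raises IndexError: all four dims positive but
-- in_data shorter than N*C*H*W (A reads every index 0..N*C*H*W-1).
def Pre_HWCN_to_NCHW (in_data : List Int) (N : Int) (C : Int) (H : Int) (W : Int) : Prop :=
  (N ≤ 0 ∨ C ≤ 0 ∨ H ≤ 0 ∨ W ≤ 0) ∨ N*C*H*W ≤ (in_data.length : Int)
instance (in_data : List Int) (N : Int) (C : Int) (H : Int) (W : Int) : Decidable (Pre_HWCN_to_NCHW in_data N C H W) := by unfold Pre_HWCN_to_NCHW; infer_instance

def pvWitness_HWCN_to_NCHW : List Int × Int × Int × Int × Int := ([0,1,2,3,4,5,6,7], 2, 2, 2, 1)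

def Spec_HWCN_to_NCHW (in_data : List Int) (N : Int) (C : Int) (H : Int) (W : Int) (out : List Int) : Prop := out = HWCN_to_NCHW_alt in_data N C H W
instance (in_data : List Int) (N : Int) (C : Int) (H : Int) (W : Int) (out : List Int) : Decidable (Spec_HWCN_to_NCHW in_data N C H W out) := by unfold Spec_HWCN_to_NCHW; infer_instance

-- ===== CLAIM =====
def Claim_equal_HWCN_to_NCHW : Prop := ∀ (in_data : List Int) (N : Int) (C : Int) (H : Int) (W : Int), Dom_HWCN_to_NCHW in_data N C H W → Pre_HWCN_to_NCHW in_data N C H W → Spec_HWCN_to_NCHW in_data N C H W (HWCN_to_NCHW in_data N C H W)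

-- ===== LEMMAS AND PROOFS =====

-- range(m) is empty for m ≤ 0
lemma pyRange_stop_nonpos (m : Int) (h : m ≤ 0) : PySem.List.pyRange 0 m 1 = [] := by
  simp [PySem.List.pyRange, show ¬(0:Int) < m by omega]

-- with a degenerate shape, A's loops run zero times
lemma A_eq_nil (in_data : List Int) (N C H W : Int)
    (h : N ≤ 0 ∨ C ≤ 0 ∨ H ≤ 0 ∨ W ≤ 0) :
    HWCN_to_NCHW in_data N C H W = [] := by
  unfold HWCN_to_NCHW
  rcases h with h|h|h|h
  · simp [pyRange_stop_nonpos _ h]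
  · simp [pyRange_stop_nonpos _ h]
  · simp [pyRange_stop_nonpos _ h]
  · simp [pyRange_stop_nonpos _ h]

-- flattening one level of nested iteration into a flat index with div/mod
lemma flatMap_range_flatMap {α : Type} (a b : Nat) (f : Nat → Nat → List α) :
    (List.range a).flatMap (fun i => (List.range b).flatMap (f i)) =
    (List.range (a*b)).flatMap (fun k => f (k / b) (k % b)) := by
  induction a with
  | zero => simp
  | succ a ih =>
    rw [List.range_succ, List.flatMap_append, ih, Nat.succ_mul, List.range_add,
        List.flatMap_append, List.flatMap_map]
    congr 1
    simp only [List.flatMap_cons, List.flatMap_nil, List.append_nil]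
    apply List.flatMap_congr
    intro j hj
    have hb : j < b := List.mem_range.mp hj
    have hbpos : 0 < b := Nat.lt_of_le_of_lt (Nat.zero_le j) hb
    have h1 : (a*b + j)/b = a := by
      rw [Nat.add_comm, Nat.add_mul_div_right _ _ hbpos, Nat.div_eq_of_lt hb, Nat.zero_add]
    have h2 : (a*b + j) % b = j := by
      rw [Nat.add_comm, Nat.add_mul_mod_self_right]; exact Nat.mod_eq_of_lt hb
    show f a j = f ((a*b + j)/b) ((a*b + j) % b)
    rw [h1, h2]

lemma A_eq_pos (in_data : List Int) (a b u v : Nat) :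
    HWCN_to_NCHW in_data ↑a ↑b ↑u ↑v =
    (List.range a).flatMap (fun n => (List.range b).flatMap (fun c =>
      (List.range (u*v)).flatMap (fun p => [in_data.getD ((p*b+c)*a+n) 0]))) := by
  unfold HWCN_to_NCHW
  simp only [PySem.List.pyRange_zero_natCast, List.foldl_map,
    PySem.List.foldl_append_eq_flatMap, List.nil_append]
  apply List.flatMap_congr; intro n _
  apply List.flatMap_congr; intro c _
  rw [flatMap_range_flatMap]
  apply List.flatMap_congr; intro p _
  have hidx : ((↑(p/v) * (↑v * ↑b * ↑a) + ↑(p%v) * (↑b * ↑a) + ↑c * ↑a + ↑n : Int))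
      = ((((p*b+c)*a+n : Nat) : Int)) := by
    obtain ⟨q, hq⟩ : ∃ q, p / v = q := ⟨_, rfl⟩
    obtain ⟨r, hr⟩ : ∃ r, p % v = r := ⟨_, rfl⟩
    have hp : p = v * q + r := by rw [← hq, ← hr]; exact (Nat.div_add_mod p v).symm
    rw [hq, hr, hp]; push_cast; ring
  rw [hidx, PySem.List.pyGetD_natCast]

lemma getD_take_drop {α : Type} (xs : List α) (d : α) (s t j : Nat)
    (hj : j < t) (hst : s + t ≤ xs.length) :
    ((xs.drop s).take t).getD j d = xs.getD (s + j) d := by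
  have h1 : j < ((xs.drop s).take t).length := by simp; omega
  have h2 : s + j < xs.length := by omega
  rw [List.getD_eq_getElem _ _ h1, List.getD_eq_getElem _ _ h2]
  simp [List.getElem_take, List.getElem_drop]

lemma filterMap_head?_eq {α : Type} (d : α) (rows : List (List α))
    (h : ∀ r ∈ rows, r ≠ []) :
    rows.filterMap List.head? = rows.map (fun r => r.getD 0 d) := by
  induction rows with
  | nil => simp
  | cons r rs ih =>
    cases r with
    | nil => exact absurd rfl (h [] (by simp))
    | cons x xs =>
      simp only [List.filterMap_cons, List.head?_cons, List.map_cons, List.getD_cons_zero]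
      rw [ih (fun r hr => h r (by simp [hr]))]

lemma zipStar_const_len {α : Type} (d : α) (m : Nat) :
    ∀ (rows : List (List α)), rows ≠ [] → (∀ r ∈ rows, r.length = m) →
    pyZipStar rows = (List.range m).map (fun j => rows.map (fun r => r.getD j d)) := by
  induction m with
  | zero =>
    intro rows hne hlen
    rw [pyZipStar]
    have : (rows.isEmpty || rows.any List.isEmpty) = true := by
      cases rows with
      | nil => exact absurd rfl hne
      | cons r rs =>
        simp only [Bool.or_eq_true, List.any_eq_true]
        exact Or.inr ⟨r, by simp, List.isEmpty_iff.mpr (List.eq_nil_of_length_eq_zero (hlen r (by simp)))⟩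
    simp [this]
  | succ m ih =>
    intro rows hne hlen
    have hnil : ∀ r ∈ rows, r ≠ [] := by
      intro r hr hcon
      have := hlen r hr; rw [hcon] at this; simp at this
    rw [pyZipStar]
    have hcond : (rows.isEmpty || rows.any List.isEmpty) = false := by
      simp only [Bool.or_eq_false_iff, List.isEmpty_eq_false_iff, List.any_eq_false]
      exact ⟨hne, fun r hr => by simpa [List.isEmpty_iff] using hnil r hr⟩
    rw [if_neg (by simp [hcond])]
    rw [filterMap_head?_eq d rows hnil]
    rw [ih (rows.map List.tail) (by simpa using hne)
        (by intro r hr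
            simp only [List.mem_map] at hr
            obtain ⟨y, hy, rfl⟩ := hr
            have := hlen y hy
            simp [List.length_tail, this])]
    rw [List.range_succ_eq_map, List.map_cons, List.map_map]
    congr 1
    apply List.map_congr_left
    intro j _
    simp only [Function.comp, List.map_map]
    apply List.map_congr_left
    intro r hr
    have := hnil r hr
    cases r with
    | nil => exact absurd rfl this
    | cons x xs => simp

lemma B_eq_pos (in_data : List Int) (a b u v : Nat)
    (ha : 0 < a) (hb : 0 < b) (hu : 0 < u) (hv : 0 < v)
    (hlen : u*v*b*a ≤ in_data.length) :
    HWCN_to_NCHW_alt in_data ↑a ↑b ↑u ↑v =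
    (List.range a).flatMap (fun n => (List.range b).flatMap (fun c =>
      (List.range (u*v)).flatMap (fun p => [in_data.getD ((p*b+c)*a+n) 0]))) := by
  unfold HWCN_to_NCHW_alt
  rw [if_neg (by omega)]
  have hM : (↑u * ↑v * ↑b : Int) = ((u*v*b : Nat) : Int) := by push_cast; ring
  have hrows : List.map (fun i => PySem.List.slice in_data (some (i * (a:Int))) (some ((i + 1) * (a:Int))))
      (PySem.List.pyRange 0 (↑u * ↑v * ↑b)) =
      (List.range (u*v*b)).map (fun i => (in_data.drop (i*a)).take a) := by
    rw [hM, PySem.List.pyRange_zero_natCast, List.map_map]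
    apply List.map_congr_left; intro i _
    show PySem.List.slice in_data (some ((i:Int) * a)) (some (((i:Int) + 1) * a)) = (in_data.drop (i*a)).take a
    have h1 : ((i:Int) * a) = ((i*a : Nat) : Int) := by push_cast; ring
    have h2 : (((i:Int)+1) * a) = ((i*a : Nat) : Int) + (a : Int) := by push_cast; ring
    rw [h1, h2, PySem.List.slice_natCast_add]
  rw [hrows]
  simp only []
  have hMpos : 0 < u*v*b := by positivity
  have hne : (List.range (u*v*b)).map (fun i => List.take a (List.drop (i * a) in_data)) ≠ [] := by
    simp [List.range_eq_nil, Nat.pos_iff_ne_zero.mp hMpos]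
  have hlens : ∀ r ∈ (List.range (u*v*b)).map (fun i => List.take a (List.drop (i * a) in_data)), r.length = a := by
    intro r hr
    simp only [List.mem_map, List.mem_range] at hr
    obtain ⟨i, hi, rfl⟩ := hr
    have h3 : i * a + a ≤ in_data.length := by
      have h1 : (i+1) * a ≤ (u*v*b) * a := Nat.mul_le_mul_right a hi
      have h2 : (i+1) * a = i*a + a := by ring
      omega
    simp only [List.length_take, List.length_drop]
    omega
  rw [zipStar_const_len (0:Int) a _ hne hlens]
  simp only [List.map_map]
  have hcols : (List.range a).map (fun j => (List.range (u*v*b)).map ((fun r => r.getD j 0) ∘ (fun i => List.take a (List.drop (i * a) in_data)))) =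
      (List.range a).map (fun n => (List.range (u*v*b)).map (fun i => in_data.getD (i*a+n) 0)) := by
    apply List.map_congr_left
    intro j hj
    apply List.map_congr_left
    intro i hi
    simp only [List.mem_range] at hj hi
    have h1 : (i+1) * a ≤ (u*v*b) * a := Nat.mul_le_mul_right a hi
    have h2 : (i+1) * a = i*a + a := by ring
    have h3 : (u*v*b) * a = u*v*b*a := by ring
    exact getD_take_drop in_data 0 (i*a) a j hj (by omega)
  rw [hcols]
  have hflat : ∀ (init : List Int) (l : List (List Int)), l.foldl (fun out col2 => out ++ col2) init = init ++ l.flatMap id :=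
    fun init l => PySem.List.foldl_append_eq_flatMap id l init
  simp only [List.foldl_map, hflat]
  simp only [PySem.List.foldl_append_eq_flatMap, List.nil_append]
  apply List.flatMap_congr
  intro n hn
  have hrows2 : List.map (fun j => PySem.List.slice (List.map (fun i => in_data.getD (i * a + n) 0) (List.range (u * v * b))) (some (j * (b:Int))) (some ((j + 1) * (b:Int))))
      (PySem.List.pyRange 0 (↑u * ↑v)) =
      (List.range (u*v)).map (fun j => ((List.map (fun i => in_data.getD (i * a + n) 0) (List.range (u * v * b))).drop (j*b)).take b) := by
    have hM2 : (↑u * ↑v : Int) = ((u*v : Nat) : Int) := by push_cast; ring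
    rw [hM2, PySem.List.pyRange_zero_natCast, List.map_map]
    apply List.map_congr_left; intro j _
    show PySem.List.slice _ (some ((j:Int) * b)) (some (((j:Int) + 1) * b)) = _
    have h1 : ((j:Int) * b) = ((j*b : Nat) : Int) := by push_cast; ring
    have h2 : (((j:Int)+1) * b) = ((j*b : Nat) : Int) + (b : Int) := by push_cast; ring
    rw [h1, h2, PySem.List.slice_natCast_add]
  rw [hrows2]
  have hne2 : (List.range (u*v)).map (fun j => ((List.map (fun i => in_data.getD (i * a + n) 0) (List.range (u * v * b))).drop (j*b)).take b) ≠ [] := by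
    have : 0 < u*v := by positivity
    simp [List.range_eq_nil, Nat.pos_iff_ne_zero.mp this]
  have hlens2 : ∀ r ∈ (List.range (u*v)).map (fun j => ((List.map (fun i => in_data.getD (i * a + n) 0) (List.range (u * v * b))).drop (j*b)).take b), r.length = b := by
    intro r hr
    simp only [List.mem_map, List.mem_range] at hr
    obtain ⟨j, hj, rfl⟩ := hr
    have h1 : (j+1) * b ≤ (u*v) * b := Nat.mul_le_mul_right b hj
    have h2 : (j+1) * b = j*b + b := by ring
    have h3 : (u*v) * b = u*v*b := by ring
    simp only [List.length_take, List.length_drop, List.length_map, List.length_range]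
    omega
  rw [zipStar_const_len (0:Int) b _ hne2 hlens2]
  rw [List.flatMap_map]
  apply List.flatMap_congr
  intro c hc
  simp only [List.mem_range] at hn hc
  have hsing : List.flatMap (fun p => [in_data.getD ((p * b + c) * a + n) 0]) (List.range (u * v))
      = (List.range (u*v)).map (fun p => in_data.getD ((p * b + c) * a + n) 0) :=
    Eq.symm List.map_eq_flatMap
  rw [hsing, id_eq, List.map_map]
  apply List.map_congr_left
  intro j hj
  simp only [List.mem_range] at hj
  have hMlen : (List.map (fun i => in_data.getD (i * a + n) 0) (List.range (u * v * b))).length = u*v*b := by simp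
  have h1 : (j+1) * b ≤ (u*v) * b := Nat.mul_le_mul_right b hj
  have h2 : (j+1) * b = j*b + b := by ring
  have h3 : (u*v) * b = u*v*b := by ring
  have hstep : ((List.take b (List.drop (j * b) (List.map (fun i => in_data.getD (i * a + n) 0) (List.range (u * v * b)))))).getD c 0
      = (List.map (fun i => in_data.getD (i * a + n) 0) (List.range (u * v * b))).getD (j*b + c) 0 := by
    exact getD_take_drop _ 0 (j*b) b c hc (by omega)
  simp only [Function.comp_apply]
  rw [hstep]
  have hlt : j*b + c < u*v*b := by omega
  rw [List.getD_eq_getElem _ _ (by simpa using hlt)]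
  simp [List.getElem_map, List.getElem_range]

-- ===== VERDICT =====
theorem HWCN_to_NCHW_spec : Claim_equal_HWCN_to_NCHW := by
  intro in_data N C H W _ hpre
  unfold Spec_HWCN_to_NCHW
  by_cases h : N ≤ 0 ∨ C ≤ 0 ∨ H ≤ 0 ∨ W ≤ 0
  · rw [A_eq_nil in_data N C H W h]
    simp [HWCN_to_NCHW_alt, h]
  · have hlenI : N*C*H*W ≤ (in_data.length : Int) := by
      rcases hpre with hpre | hpre
      · exact absurd hpre h
      · exact hpre
    obtain ⟨a, rfl⟩ : ∃ a:Nat, N = ↑a := ⟨N.toNat, by omega⟩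
    obtain ⟨b, rfl⟩ : ∃ b:Nat, C = ↑b := ⟨C.toNat, by omega⟩
    obtain ⟨u, rfl⟩ : ∃ u:Nat, H = ↑u := ⟨H.toNat, by omega⟩
    obtain ⟨v, rfl⟩ : ∃ v:Nat, W = ↑v := ⟨W.toNat, by omega⟩
    have ha : 0 < a := by omega
    have hb : 0 < b := by omega
    have hu : 0 < u := by omega
    have hv : 0 < v := by omega
    have hlenN : u*v*b*a ≤ in_data.length := by
      have h1 : ((a*b*u*v : Nat) : Int) ≤ (in_data.length : Int) := by push_cast; push_cast at hlenI; nlinarith [hlenI]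
      have h2 : a*b*u*v = u*v*b*a := by ring
      omega
    rw [A_eq_pos in_data a b u v, B_eq_pos in_data a b u v ha hb hu hv hlenN]
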